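-- pv_equiv track=rewrite | github.com/T9404/EGE | Python/ЕГЭ2021;2022/6/Задания из kompege/1189.py | f
-- ===== SOURCE A (Python) =====
-- def f(x):
--     s = x
--     n = 1
--     while s <= 80:
--         s += 7
--         n *= 3
--     if n == 81:
--         return 1
--     else:
--         return 0
-- ===== SOURCE B (Python) =====
-- def f(x):
--     c = (80 - x) // 7 + 1 if x <= 80 else 0
--     return 1 if c == 4 else 0
-- ===== Notes on version B (the rewrite author's own statement) =====
-- stated objective: simpler
-- what changed: Replaced the while-loop that accumulates s and a power of three with a closed-form floor-division count of iterations, returning the flag exactly when that count equals four.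
import Mathlib
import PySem

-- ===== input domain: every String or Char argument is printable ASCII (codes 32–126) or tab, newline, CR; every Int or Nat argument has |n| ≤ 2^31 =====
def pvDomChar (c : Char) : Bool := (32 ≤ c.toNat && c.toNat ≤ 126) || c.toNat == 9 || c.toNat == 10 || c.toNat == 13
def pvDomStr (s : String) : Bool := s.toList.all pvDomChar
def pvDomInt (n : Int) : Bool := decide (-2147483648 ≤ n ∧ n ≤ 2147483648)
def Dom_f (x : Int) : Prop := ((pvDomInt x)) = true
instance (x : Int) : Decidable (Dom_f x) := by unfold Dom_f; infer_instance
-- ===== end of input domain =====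

-- B replaces A's while-loop with a closed-form floor-division iteration count; objective: simpler.

-- ===== PORT A =====
-- while s <= 80: s += 7; n *= 3
def fLoop (s n : Int) : Int × Int :=
  if s ≤ 80 then fLoop (s + 7) (n * 3) else (s, n)
termination_by (81 - s).toNat
decreasing_by omega

def f (x : Int) : Int :=
  let p := fLoop x 1
  if p.2 = 81 then 1 else 0

-- ===== PORT B =====
def f_alt (x : Int) : Int :=
  let c : Int := if x ≤ 80 then PySem.Int.floordiv (80 - x) 7 + 1 else 0
  if c = 4 then 1 else 0

-- ===== PRECONDITION & SPEC =====
def Spec_f (x : Int) (out : Int) : Prop := out = f_alt x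
instance (x : Int) (out : Int) : Decidable (Spec_f x out) := by unfold Spec_f; infer_instance

-- ===== CLAIM (what is proved, stated in full; the proofs are below) =====
def Claim_equal_f : Prop := ∀ (x : Int), Dom_f x → Spec_f x (f x)

-- ===== LEMMAS AND PROOFS =====

-- number of iterations of A's loop starting at s
def iters (s : Int) : Nat := if s ≤ 80 then (80 - s).toNat / 7 + 1 else 0

lemma fLoop_snd (s n : Int) : (fLoop s n).2 = n * 3 ^ iters s := by
  by_cases h : s ≤ 80
  · rw [fLoop]
    simp only [h, if_pos]
    rw [fLoop_snd (s + 7) (n * 3)]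
    have : iters s = iters (s + 7) + 1 := by
      unfold iters; split_ifs <;> omega
    rw [this, pow_succ]
    ring
  · rw [fLoop]
    simp only [h, if_neg, not_false_iff]
    unfold iters
    simp [h]
termination_by (81 - s).toNat
decreasing_by omega

lemma pow3_eq_81 (c : Nat) : (3 : Int) ^ c = 81 ↔ c = 4 := by
  constructor
  · intro h
    have : (3 : Int) ^ c = 3 ^ 4 := by norm_num [h]
    have h2 : (3:Nat) ^ c = 3 ^ 4 := by exact_mod_cast this
    exact Nat.pow_right_injective (by norm_num) h2
  · rintro rfl; norm_num

-- ===== VERDICT (by name: the statement is the Claim_ definition above) =====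
theorem f_spec : Claim_equal_f := by
  intro x _
  unfold Spec_f f f_alt
  simp only [fLoop_snd, one_mul]
  by_cases h : x ≤ 80
  · have hd : PySem.Int.floordiv (80 - x) 7 = (80 - x) / 7 :=
      PySem.Int.floordiv_eq_ediv_of_pos (by norm_num)
    have hit : iters x = (80 - x).toNat / 7 + 1 := by unfold iters; simp [h]
    simp only [h, if_pos, hd, hit, pow3_eq_81]
    by_cases h4 : (80 - x).toNat / 7 + 1 = 4
    · have h5 : (80 - x) / 7 + 1 = 4 := by omega
      simp [h4, h5]
    · have h5 : ¬ ((80 - x) / 7 + 1 = 4) := by omega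
      simp [h4, h5]
  · have hit : iters x = 0 := by unfold iters; simp [h]
    simp [h, hit]
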